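-- pv_equiv track=rewrite | github.com/psick22/python-ps | programmers/level-2/두개 이하로 다른 비트/2.py | solution
-- ===== SOURCE A (Python) =====
-- def solution(numbers):
--     answer = []
--
--     for number in numbers:
--         if number == 0:
--             answer.append(1)
--             continue
--         num_bin = bin(number).lstrip('0b')
--
--         if num_bin[-1] == '0':
--             answer.append(number + 1)
--         else:
--             i = len(num_bin) - 1
--             cnt = 0
--             flag = True
--             while flag and i >= 0:
--                 if num_bin[i] == '1':
--                     cnt += 1
--                 else:
--                     flag = False
--                 i -= 1
--             answer.append(number + 2 ** (cnt - 1))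
--
--     return answer
-- ===== SOURCE B (Python) =====
-- def solution(numbers):
--     # Odd case in O(1) by bit arithmetic instead of scanning the binary string:
--     # for odd n the trick isolates the lowest zero bit of the magnitude,
--     # (~m) & (m + 1) == 2**(number of trailing one bits of m), m = abs(n).
--     return [1 if n == 0
--             else n + 1 if n % 2 == 0
--             else n + (((~abs(n)) & (abs(n) + 1)) >> 1)
--             for n in numbers]
-- ===== Notes on version B (the rewrite author's own statement) =====
-- stated objective: faster
-- what changed: Replaces A's binary-string construction (bin/lstrip) and right-to-left character scan counting trailing ones with a single comprehension whose odd case uses the constant-time bit trick (~m)&(m+1) on the magnitude, so no string is built and no inner scan runs.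
import Mathlib
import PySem

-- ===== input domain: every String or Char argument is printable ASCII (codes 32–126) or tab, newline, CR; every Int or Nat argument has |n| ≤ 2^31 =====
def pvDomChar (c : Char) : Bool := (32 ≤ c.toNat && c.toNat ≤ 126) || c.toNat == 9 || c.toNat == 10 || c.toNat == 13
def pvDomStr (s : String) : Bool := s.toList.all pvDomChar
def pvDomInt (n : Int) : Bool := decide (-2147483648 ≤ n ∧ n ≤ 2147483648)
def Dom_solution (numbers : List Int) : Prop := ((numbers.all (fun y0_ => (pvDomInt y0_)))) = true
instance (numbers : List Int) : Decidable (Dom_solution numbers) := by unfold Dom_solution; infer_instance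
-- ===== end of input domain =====

-- B replaces A's binary-string scan by O(1) bit arithmetic in the odd case; return values are identical.

-- ===== PORT A =====
-- A's inner `while flag and i >= 0` loop, ported as recursion on the index i.
def pvCntLoop (s : List Char) (i : Int) (cnt : Nat) (flag : Bool) : Nat :=
  if flag = true ∧ 0 ≤ i then
    if PySem.List.pyGetD s i ' ' = '1' then pvCntLoop s (i - 1) (cnt + 1) flag
    else pvCntLoop s (i - 1) cnt false
  else cnt
termination_by (i + 1).toNat
decreasing_by all_goals omega

-- the per-element body of A's `for` loop (value appended for one `number`);
-- bin(number).lstrip('0b') is ported as PySem.Int.toBinChars0b followed by dropping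
-- leading characters from the set {'0','b'} (exact: that is what str.lstrip('0b') does);
-- num_bin[-1] is PySem.List.pyGet? at -1 (the string is never empty since number ≠ 0);
-- Python's 2 ** (cnt - 1) is reached only with cnt ≥ 1 (the last character is '1'),
-- where Nat subtraction agrees.
def pvStepA (number : Int) : Int :=
  if number = 0 then 1
  else
    let numBin := (PySem.Int.toBinChars0b number).dropWhile (fun c => c == '0' || c == 'b')
    if PySem.List.pyGet? numBin (-1) = some '0' then number + 1
    else number + 2 ^ (pvCntLoop numBin (PySem.List.len numBin - 1) 0 true - 1)

def solution (numbers : List Int) : List Int :=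
  List.foldl (fun answer number => answer ++ [pvStepA number]) [] numbers

-- ===== PORT B =====
-- the conditional expression inside B's comprehension
def pvStepB (n : Int) : Int :=
  if n = 0 then 1
  else if PySem.Int.mod n 2 = 0 then n + 1
  else n + (PySem.Int.band (Int.not |n|) (|n| + 1)) >>> (1 : Nat)

def solution_alt (numbers : List Int) : List Int :=
  numbers.map pvStepB

-- ===== PRECONDITION & SPEC =====
def Spec_solution (numbers : List Int) (out : List Int) : Prop := out = solution_alt numbers
instance (numbers : List Int) (out : List Int) : Decidable (Spec_solution numbers out) := by unfold Spec_solution; infer_instance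

-- ===== CLAIM (what is proved, stated in full; the proofs are below) =====
def Claim_equal_solution : Prop := ∀ (numbers : List Int), Dom_solution numbers → Spec_solution numbers (solution numbers)

-- ===== LEMMAS AND PROOFS =====

-- number of trailing '1' characters of a character list
def pvTrc (s : List Char) : Nat := (s.reverse.takeWhile (· == '1')).length

-- number of trailing one bits of a natural number
def pvTro (m : Nat) : Nat :=
  if h : m % 2 = 1 then pvTro (m / 2) + 1 else 0
decreasing_by omega

lemma pvTro_even {m : Nat} (h : m % 2 = 0) : pvTro m = 0 := by
  rw [pvTro]; simp [h]

lemma pvTro_odd {m : Nat} (h : m % 2 = 1) : pvTro m = pvTro (m / 2) + 1 := by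
  rw [pvTro]; simp [h]

lemma pvTro_pos {m : Nat} (h : m % 2 = 1) : 1 ≤ pvTro m := by
  rw [pvTro_odd h]; omega

lemma pvTrc_nil : pvTrc [] = 0 := rfl

lemma pvTrc_append_singleton (s : List Char) (c : Char) :
    pvTrc (s ++ [c]) = if c = '1' then pvTrc s + 1 else 0 := by
  by_cases h : c = '1' <;>
    simp [pvTrc, List.reverse_append, h]

-- trailing-'1' count ignores a prefix ending in 'b'
lemma pvTakeWhile_stop : ∀ xs : List Char,
    (List.takeWhile (· == '1') (xs ++ ['b', '0', '-'])).length =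
    (List.takeWhile (· == '1') xs).length := by
  intro xs
  induction xs with
  | nil => simp
  | cons x xs ih =>
    by_cases h : x = '1' <;> simp [h, ih]

lemma pvTrc_prefix (l : List Char) : pvTrc (['-', '0', 'b'] ++ l) = pvTrc l := by
  simpa [pvTrc, List.reverse_append] using pvTakeWhile_stop l.reverse

-- (2u) &&& (2v+1) = 2 (u &&& v)
lemma pvLandEvenOdd (u v : Nat) : (2 * u) &&& (2 * v + 1) = 2 * (u &&& v) := by
  apply Nat.eq_of_testBit_eq
  intro i
  cases i with
  | zero =>
    rw [Nat.testBit_land, Nat.testBit_zero, Nat.testBit_zero, Nat.testBit_zero]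
    simp [Nat.mul_mod_right]
  | succ i =>
    have h1 : 2 * u / 2 = u := by omega
    have h2 : (2 * v + 1) / 2 = v := by omega
    have h3 : 2 * (u &&& v) / 2 = u &&& v := by omega
    rw [Nat.testBit_land, Nat.testBit_add_one, Nat.testBit_add_one,
      Nat.testBit_add_one, h1, h2, h3, Nat.testBit_land]

lemma pvLandOddEven (u v : Nat) : (2 * u + 1) &&& (2 * v) = 2 * (u &&& v) := by
  rw [Nat.land_comm, pvLandEvenOdd, Nat.land_comm]

lemma pvPowTro_le : ∀ m : Nat, m % 2 = 1 → 2 ^ pvTro m ≤ m + 1 := by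
  intro m
  induction m using Nat.strong_induction_on with
  | _ m IH =>
    intro h
    obtain ⟨k, rfl⟩ : ∃ k, m = 2 * k + 1 := ⟨m / 2, by omega⟩
    rw [pvTro_odd h]
    have hk2 : (2 * k + 1) / 2 = k := by omega
    rw [hk2, pow_succ]
    by_cases hk : k % 2 = 1
    · have := IH k (by omega) hk
      omega
    · rw [pvTro_even (by omega)]; omega

-- for odd m, (m+1) &&& m = (m+1) - 2^(trailing ones of m)
lemma pvLandKey : ∀ m : Nat, m % 2 = 1 → (m + 1) &&& m = (m + 1) - 2 ^ pvTro m := by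
  intro m
  induction m using Nat.strong_induction_on with
  | _ m IH =>
    intro h
    obtain ⟨k, rfl⟩ : ∃ k, m = 2 * k + 1 := ⟨m / 2, by omega⟩
    have hk2 : (2 * k + 1) / 2 = k := by omega
    have hland : (2 * k + 1 + 1) &&& (2 * k + 1) = 2 * ((k + 1) &&& k) := by
      have : 2 * k + 1 + 1 = 2 * (k + 1) := by ring
      rw [this, pvLandEvenOdd]
    rw [hland, pvTro_odd h, hk2]
    by_cases hk : k % 2 = 1
    · have hih := IH k (by omega) hk
      have hle := pvPowTro_le k hk
      rw [hih, pow_succ]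
      omega
    · have hko : k % 2 = 0 := by omega
      rw [pvTro_even hko, pow_succ]
      obtain ⟨j, rfl⟩ : ∃ j, k = 2 * j := ⟨k / 2, by omega⟩
      have hjj : j &&& j = j := Nat.eq_of_testBit_eq fun i => by
        rw [Nat.testBit_land, Bool.and_self]
      rw [pvLandOddEven, hjj]
      omega

-- structure of the binary digit string
lemma pvDigits_head : ∀ m : Nat, 0 < m → ∃ rest, Nat.toDigits 2 m = '1' :: rest := by
  intro m
  induction m using Nat.strong_induction_on with
  | _ m IH =>
    intro hm
    by_cases h2 : m < 2
    · have : m = 1 := by omega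
      subst this
      exact ⟨[], by rw [Nat.toDigits_of_lt_base (by norm_num)]; rfl⟩
    · rw [Nat.toDigits_eq_if (by norm_num), if_neg h2]
      obtain ⟨rest, hrest⟩ := IH (m / 2) (by omega) (by omega)
      exact ⟨rest ++ [(m % 2).digitChar], by rw [hrest]; rfl⟩

lemma pvDigits_last (m : Nat) (hm : 0 < m) :
    (Nat.toDigits 2 m).getLast? = some (if m % 2 = 1 then '1' else '0') := by
  by_cases h2 : m < 2
  · have : m = 1 := by omega
    subst this
    rw [Nat.toDigits_of_lt_base (by norm_num)]
    rfl
  · rw [Nat.toDigits_eq_if (by norm_num), if_neg h2]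
    have h01 : m % 2 = 0 ∨ m % 2 = 1 := by omega
    rcases h01 with h | h <;> simp [h] <;> decide

lemma pvDigits_trc : ∀ m : Nat, 0 < m → pvTrc (Nat.toDigits 2 m) = pvTro m := by
  intro m
  induction m using Nat.strong_induction_on with
  | _ m IH =>
    intro hm
    by_cases h2 : m < 2
    · have : m = 1 := by omega
      subst this
      have h1 : pvTro 1 = 1 := by
        rw [pvTro_odd (by norm_num), show (1 : Nat) / 2 = 0 from rfl,
          pvTro_even (by norm_num)]
      rw [Nat.toDigits_of_lt_base (by norm_num), h1]
      decide
    · rw [Nat.toDigits_eq_if (by norm_num), if_neg h2, pvTrc_append_singleton]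
      have h01 : m % 2 = 0 ∨ m % 2 = 1 := by omega
      rcases h01 with h | h
      · rw [pvTro_even h]
        simp [h, Nat.digitChar]
      · rw [pvTro_odd h, IH (m / 2) (by omega) (by omega)]
        simp [h, Nat.digitChar]

-- A's while loop computes the trailing-'1' count of the scanned prefix
lemma pvCntLoop_false (s : List Char) (i : Int) (cnt : Nat) : pvCntLoop s i cnt false = cnt := by
  rw [pvCntLoop]; simp

lemma pvCntLoop_spec : ∀ (k : Nat) (s : List Char) (cnt : Nat), k ≤ s.length →
    pvCntLoop s ((k : Int) - 1) cnt true = cnt + pvTrc (s.take k) := by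
  intro k
  induction k with
  | zero =>
    intro s cnt _
    rw [pvCntLoop]
    norm_num [pvTrc_nil]
  | succ k ih =>
    intro s cnt hk
    have hklt : k < s.length := by omega
    have hcast : ((k + 1 : Nat) : Int) - 1 = ((k : Nat) : Int) := by push_cast; ring
    rw [pvCntLoop, hcast]
    have hget : PySem.List.pyGetD s ((k : Nat) : Int) ' ' = s[k] := by
      simp [pysem, List.getD_eq_getElem?_getD, List.getElem?_eq_getElem hklt]
    have htake : s.take (k + 1) = s.take k ++ [s[k]] := by
      rw [List.take_add_one]
      simp [List.getElem?_eq_getElem hklt]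
    rw [htake, pvTrc_append_singleton, hget]
    by_cases hc : s[k] = '1'
    · rw [if_pos (by simp), if_pos hc, ih s (cnt + 1) (by omega), if_pos hc]
      omega
    · rw [if_pos (by simp), if_neg hc, pvCntLoop_false, if_neg hc]
      omega

lemma pvNot_natCast (m : Nat) : Int.not (m : Int) = -(m : Int) - 1 := by
  show Int.negSucc m = _
  rw [Int.negSucc_eq]
  ring

-- the per-element equality: A's appended value = B's
lemma pvStep_eq (n : Int) : pvStepA n = pvStepB n := by
  by_cases h0 : n = 0
  · simp [pvStepA, pvStepB, h0]
  set m : Nat := n.natAbs with hmdef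
  have hm : 0 < m := Int.natAbs_pos.mpr h0
  obtain ⟨rest, hd⟩ := pvDigits_head m hm
  have hmod : PySem.Int.mod n 2 = 0 ↔ m % 2 = 0 := by
    rw [PySem.Int.mod_eq_zero_iff_dvd]
    constructor
    · intro hdvd; omega
    · intro hdvd; omega
  -- the stripped string is the digit string (n > 0) or '-0b' ++ digits (n < 0)
  have habs : |n| = (m : Int) := Int.abs_eq_natAbs n
  rcases lt_or_gt_of_ne h0 with hneg | hpos
  · -- n < 0
    have hbin : (PySem.Int.toBinChars0b n).dropWhile (fun c => c == '0' || c == 'b') =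
        ['-', '0', 'b'] ++ Nat.toDigits 2 m := by
      rw [PySem.Int.toBinChars0b, if_pos hneg, hmdef]
      rfl
    have hlast : PySem.List.pyGet? (['-', '0', 'b'] ++ Nat.toDigits 2 m) (-1) =
        some (if m % 2 = 1 then '1' else '0') := by
      rw [PySem.List.pyGet?_neg_one, List.getLast?_append, pvDigits_last m hm]
      simp
    simp only [pvStepA, pvStepB, if_neg h0]
    rw [hbin, hlast]
    by_cases he : m % 2 = 0
    · rw [if_pos (by simp [he]), if_pos (hmod.mpr he)]
    · have ho : m % 2 = 1 := by omega
      rw [if_neg (by simp [ho]), if_neg (fun hc => he (hmod.mp hc))]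
      congr 1
      -- count = trailing ones of m
      have hlen : PySem.List.len (['-', '0', 'b'] ++ Nat.toDigits 2 m) - 1 =
          (((['-', '0', 'b'] ++ Nat.toDigits 2 m).length : Nat) : Int) - 1 := by
        simp [pysem]
      rw [hlen, pvCntLoop_spec _ _ _ (le_refl _), List.take_length, pvTrc_prefix,
        pvDigits_trc m hm, Nat.zero_add]
      -- B's bit trick equals 2^(pvTro m - 1)
      rw [habs, pvNot_natCast]
      have hband : PySem.Int.band (-(m : Int) - 1 ) ((m : Int) + 1) =
          ((2 ^ pvTro m : Nat) : Int) := by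
        rw [PySem.Int.band]
        rw [if_neg (by omega), if_pos (by omega)]
        have h1 : ((m : Int) + 1).toNat = m + 1 := by omega
        have h2 : (-(-(m : Int) - 1) - 1).toNat = m := by omega
        rw [h1, h2, pvLandKey m ho, Nat.sub_sub_self (pvPowTro_le m ho)]
      rw [hband, Int.shiftRight_eq_div_pow]
      have ht := pvTro_pos ho
      have hp : (2 ^ pvTro m : Nat) = 2 * 2 ^ (pvTro m - 1) := by
        rw [← pow_succ']
        congr 1
        omega
      rw [hp]
      push_cast
      omega
  · -- n > 0
    have htn : n.toNat = m := by omega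
    have hbin : (PySem.Int.toBinChars0b n).dropWhile (fun c => c == '0' || c == 'b') =
        Nat.toDigits 2 m := by
      rw [PySem.Int.toBinChars0b, if_neg (by omega), htn, hd]
      rfl
    have hlast : PySem.List.pyGet? (Nat.toDigits 2 m) (-1) =
        some (if m % 2 = 1 then '1' else '0') := by
      rw [PySem.List.pyGet?_neg_one, pvDigits_last m hm]
    simp only [pvStepA, pvStepB, if_neg h0]
    rw [hbin, hlast]
    by_cases he : m % 2 = 0
    · rw [if_pos (by simp [he]), if_pos (hmod.mpr he)]
    · have ho : m % 2 = 1 := by omega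
      rw [if_neg (by simp [ho]), if_neg (fun hc => he (hmod.mp hc))]
      congr 1
      have hlen : PySem.List.len (Nat.toDigits 2 m) - 1 =
          (((Nat.toDigits 2 m).length : Nat) : Int) - 1 := by
        simp [pysem]
      rw [hlen, pvCntLoop_spec _ _ _ (le_refl _), List.take_length, pvDigits_trc m hm, Nat.zero_add]
      rw [habs, pvNot_natCast]
      have hband : PySem.Int.band (-(m : Int) - 1 ) ((m : Int) + 1) =
          ((2 ^ pvTro m : Nat) : Int) := by
        rw [PySem.Int.band]
        rw [if_neg (by omega), if_pos (by omega)]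
        have h1 : ((m : Int) + 1).toNat = m + 1 := by omega
        have h2 : (-(-(m : Int) - 1) - 1).toNat = m := by omega
        rw [h1, h2, pvLandKey m ho, Nat.sub_sub_self (pvPowTro_le m ho)]
      rw [hband, Int.shiftRight_eq_div_pow]
      have ht := pvTro_pos ho
      have hp : (2 ^ pvTro m : Nat) = 2 * 2 ^ (pvTro m - 1) := by
        rw [← pow_succ']
        congr 1
        omega
      rw [hp]
      push_cast
      omega

-- ===== VERDICT (by name: the statement is the Claim_ definition above) =====
theorem solution_spec : Claim_equal_solution := by
  intro numbers _
  unfold Spec_solution solution solution_alt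
  rw [PySem.List.foldl_append_singleton_eq_map]
  simp [List.map_congr_left (fun n _ => pvStep_eq n)]
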